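-- pv_equiv track=rewrite | github.com/pauloab/Crypto-Junior | encriptador.py | is_invertible
-- ===== SOURCE A (Python) =====
-- def is_invertible(input_matrix):
--     # Crea una matrix poblada de ceros de orden 5x3 (necesaria para sacar determinantes)
--     matrix = [[0 for x in range(3)] for y in range(5)]
--     # Puebla la matrix 3X5 con los valores de la matriz de entrada
--     k = 0
--     for i in range(0,5):
--         matrix[i] = input_matrix[k]
--         if k==2:
--             k=-1
--         k += 1
--
--     asc, desc = 0, 0
--
--     # Calcula las descendentes
--     last_value = 1
--     for f in range(0,3):
--         for c in range(0,3):
--             last_value*=matrix[f][c]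
--             f+=1
--         desc +=last_value
--         last_value = 1
--
--     last_value = 1
--
--     # Calcula las ascendentes
--     for f in range(0,3):
--         for c in reversed(range(0,3)):
--             last_value*=matrix[f][c]
--             f+=1
--         asc += last_value
--         last_value = 1
--
--     # Determina si es o no invertible
--     if desc-asc == 0:
--         return False
--     return True
-- ===== SOURCE B (Python) =====
-- def is_invertible(input_matrix):
--     a, b, c = input_matrix[0], input_matrix[1], input_matrix[2]
--     det = (a[0] * (b[1] * c[2] - b[2] * c[1])
--          - a[1] * (b[0] * c[2] - b[2] * c[0])
--          + a[2] * (b[0] * c[1] - b[1] * c[0]))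
--     return det != 0
-- ===== Notes on version B (the rewrite author's own statement) =====
-- stated objective: simpler
-- what changed: Replaced the 5x3 padded matrix, the row-cycling fill loop and the two nested Sarrus diagonal loops by a single cofactor-expansion expression over the nine entries of the first three rows.
import Mathlib
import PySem

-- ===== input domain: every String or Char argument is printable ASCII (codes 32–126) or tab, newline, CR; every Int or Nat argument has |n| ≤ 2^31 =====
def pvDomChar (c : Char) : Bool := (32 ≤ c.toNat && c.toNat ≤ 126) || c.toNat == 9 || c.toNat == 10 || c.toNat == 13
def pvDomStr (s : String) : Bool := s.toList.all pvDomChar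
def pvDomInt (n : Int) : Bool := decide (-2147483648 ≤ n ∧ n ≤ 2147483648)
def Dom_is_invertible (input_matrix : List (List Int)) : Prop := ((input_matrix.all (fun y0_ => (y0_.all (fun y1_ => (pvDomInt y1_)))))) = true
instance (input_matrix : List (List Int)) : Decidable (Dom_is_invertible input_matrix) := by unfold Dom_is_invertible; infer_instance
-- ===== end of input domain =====

-- B drops A's 5x3 padded matrix and the three loops and computes the 3x3 determinant
-- by one cofactor-expansion expression over the first three rows (simpler, same result on ints).

-- ===== PORT A =====
def is_invertible (input_matrix : List (List Int)) : Bool :=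
  let matrix : List (List Int) :=
    (List.range 5).map (fun _ => (List.range 3).map (fun _ => (0 : Int)))
  -- for i in range(0,5): matrix[i] = input_matrix[k]; if k==2: k=-1; k+=1
  let st := (PySem.List.pyRange 0 5 1).foldl
    (fun (st : List (List Int) × Int) i =>
      let m := st.1.set i.toNat ((PySem.List.pyGet? input_matrix st.2).getD [])
      let k := if st.2 == 2 then (-1 : Int) else st.2
      (m, k + 1)) (matrix, 0)
  let matrix := st.1
  -- desc: for f in range(3): for c in range(3): last_value *= matrix[f][c]; f += 1
  let desc := (PySem.List.pyRange 0 3 1).foldl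
    (fun desc f =>
      let p := (PySem.List.pyRange 0 3 1).foldl
        (fun (q : Int × Int) c =>
          (q.1 * ((PySem.List.pyGet? ((PySem.List.pyGet? matrix q.2).getD []) c).getD 0), q.2 + 1))
        ((1 : Int), f)
      desc + p.1) 0
  -- asc: same with reversed(range(0,3))
  let asc := (PySem.List.pyRange 0 3 1).foldl
    (fun asc f =>
      let p := ((PySem.List.pyRange 0 3 1).reverse).foldl
        (fun (q : Int × Int) c =>
          (q.1 * ((PySem.List.pyGet? ((PySem.List.pyGet? matrix q.2).getD []) c).getD 0), q.2 + 1))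
        ((1 : Int), f)
      asc + p.1) 0
  if desc - asc == 0 then false else true

-- ===== PORT B =====
def is_invertible_alt (input_matrix : List (List Int)) : Bool :=
  let a := (PySem.List.pyGet? input_matrix 0).getD []
  let b := (PySem.List.pyGet? input_matrix 1).getD []
  let c := (PySem.List.pyGet? input_matrix 2).getD []
  let g := fun (r : List Int) (i : Int) => (PySem.List.pyGet? r i).getD 0
  let det := g a 0 * (g b 1 * g c 2 - g b 2 * g c 1)
           - g a 1 * (g b 0 * g c 2 - g b 2 * g c 0)
           + g a 2 * (g b 0 * g c 1 - g b 1 * g c 0)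
  det != 0

-- ===== PRECONDITION & SPEC =====
-- Pre_ excludes exactly the inputs where Python A raises IndexError:
-- fewer than 3 rows, or one of the first three rows shorter than 3.
def Pre_is_invertible (input_matrix : List (List Int)) : Prop :=
  3 ≤ input_matrix.length ∧ ∀ r ∈ input_matrix.take 3, 3 ≤ r.length
instance (input_matrix : List (List Int)) : Decidable (Pre_is_invertible input_matrix) := by
  unfold Pre_is_invertible; infer_instance

def pvWitness_is_invertible : List (List Int) := [[1, 2, 3], [0, 1, 4], [5, 6, 0]]

def Spec_is_invertible (input_matrix : List (List Int)) (out : Bool) : Prop := out = is_invertible_alt input_matrix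
instance (input_matrix : List (List Int)) (out : Bool) : Decidable (Spec_is_invertible input_matrix out) := by
  unfold Spec_is_invertible; infer_instance

-- ===== CLAIM (what is proved, stated in full; the proofs are below) =====
def Claim_equal_is_invertible : Prop := ∀ (input_matrix : List (List Int)), Dom_is_invertible input_matrix → Pre_is_invertible input_matrix → Spec_is_invertible input_matrix (is_invertible input_matrix)

-- ===== LEMMAS AND PROOFS =====
theorem pvGet1 {α : Type} (x y : α) (xs : List α) : PySem.List.pyGet? (x::y::xs) 1 = some y := by
  rw [show (1:Int) = ((1:Nat):Int) by norm_num, PySem.List.pyGet?_natCast]; rfl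

theorem pvGet2 {α : Type} (x y z : α) (xs : List α) : PySem.List.pyGet? (x::y::z::xs) 2 = some z := by
  rw [show (2:Int) = ((2:Nat):Int) by norm_num, PySem.List.pyGet?_natCast]; rfl

theorem pvFin (e d : Int) (h : e = d) : decide (e = 0) = !(d != 0) := by
  subst h; by_cases h : e = 0 <;> simp [h]

-- ===== VERDICT (by name: the statement is the Claim_ definition above) =====
theorem is_invertible_spec : Claim_equal_is_invertible := by
  intro m _ hpre
  obtain ⟨hlen, hrow⟩ := hpre
  match m, hlen with
  | a :: b :: c :: rest, _ =>
    have ha : 3 ≤ a.length := hrow a (by simp [List.take_succ_cons])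
    have hb : 3 ≤ b.length := hrow b (by simp [List.take_succ_cons])
    have hc : 3 ≤ c.length := hrow c (by simp [List.take_succ_cons])
    match a, ha with
    | a0 :: a1 :: a2 :: ar, _ =>
    match b, hb with
    | b0 :: b1 :: b2 :: br, _ =>
    match c, hc with
    | c0 :: c1 :: c2 :: cr, _ =>
      show Spec_is_invertible _ _
      unfold Spec_is_invertible is_invertible is_invertible_alt
      simp only [show PySem.List.pyRange 0 5 1 = [0,1,2,3,4] from by decide,
        show PySem.List.pyRange 0 3 1 = [0,1,2] from by decide,
        show ([0,1,2] : List Int).reverse = [2,1,0] from by decide,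
        List.foldl]
      norm_num [List.set, List.replicate, PySem.List.pyGet?_zero_cons, pvGet1, pvGet2,
        show Int.toNat 2 = 2 from rfl, show Int.toNat 3 = 3 from rfl,
        show Int.toNat 4 = 4 from rfl, List.getElem_cons_succ, List.getElem_cons_zero]
      exact pvFin _ _ (by ring)
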